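-- pv_equiv track=rewrite | github.com/beatitudeps-blip/fx-alert | scripts/summary_renderer.py | render_weekly_review_text
-- ===== SOURCE A (Python) =====
-- from collections import Counter
--
-- REASON_TEXT_MAP = {
--     "W": "週足環境NG",
--     "D": "日足環境NG",
--     "A": "週足/日足不整合",
--     "P": "パターン不成立",
--     "R": "RR不足",
--     "X": "EMA乖離大",
--     "S": "週足抵抗/支持近い",
--     "E": "重要イベント",
--     "O": "既存ポジションあり",
--     "C": "総リスク/相関超過",
-- }
--
-- def summarize_signals(rows: list[dict]) -> dict:
--     """行リストから status 別件数を集計する。"""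
--     counter = Counter(r.get("status", "UNKNOWN") for r in rows)
--     return {
--         "total": len(rows),
--         "entry": counter.get("ENTRY", 0),
--         "skip": counter.get("SKIP", 0),
--         "error": counter.get("ERROR", 0),
--         "no_data": counter.get("NO_DATA", 0),
--     }
--
-- def summarize_reason_codes(rows: list[dict]) -> Counter:
--     """reason_code の出現回数を集計する。"""
--     counter = Counter()
--     for r in rows:
--         codes = r.get("reason_code", "")
--         if not codes:
--             continue
--         for c in codes.split(";"):
--             c = c.strip()
--             if c:
--                 counter[c] += 1
--     return counter
--
-- def render_weekly_review_text(
--     week_start: str,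
--     week_end: str,
--     week_rows: list[dict],
-- ) -> str:
--     """
--     週次レビューをテキストとして生成する（将来用の骨格）。
--     """
--     lines = []
--     lines.append(f"FX Weekly Review - {week_start} ~ {week_end} JST")
--     lines.append("")
--
--     summary = summarize_signals(week_rows)
--     lines.append("■ Weekly Summary")
--     lines.append(f"  対象日数: {len(set(r.get('date_jst') for r in week_rows))} 日")
--     lines.append(f"  ENTRY: {summary['entry']} 件")
--     lines.append(f"  SKIP:  {summary['skip']} 件")
--     lines.append(f"  ERROR: {summary['error']} 件")
--     lines.append("")
--
--     reason_counts = summarize_reason_codes(week_rows)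
--     if reason_counts:
--         lines.append("■ Reason Code 内訳")
--         for code, count in reason_counts.most_common():
--             lines.append(f"  {code} ({REASON_TEXT_MAP.get(code, code)}): {count}")
--         lines.append("")
--
--     lines.append("■ Daily Breakdown")
--     dates = sorted(set(r.get("date_jst", "") for r in week_rows))
--     for d in dates:
--         day_rows = [r for r in week_rows if r.get("date_jst") == d]
--         day_summary = summarize_signals(day_rows)
--         statuses = f"ENTRY={day_summary['entry']} SKIP={day_summary['skip']}"
--         lines.append(f"  {d}: {statuses}")
--     lines.append("")
--
--     return "\n".join(lines)
-- ===== SOURCE B (Python) =====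
-- from collections import Counter
--
-- REASON_TEXT_MAP = {
--     "W": "週足環境NG",
--     "D": "日足環境NG",
--     "A": "週足/日足不整合",
--     "P": "パターン不成立",
--     "R": "RR不足",
--     "X": "EMA乖離大",
--     "S": "週足抵抗/支持近い",
--     "E": "重要イベント",
--     "O": "既存ポジションあり",
--     "C": "総リスク/相関超過",
-- }
--
--
-- def render_weekly_review_text(week_start, week_end, week_rows):
--     # One fused pass over the rows: status totals and a per-date (entry, skip)
--     # grouping dict, so the daily breakdown reads the dict instead of rescanning.
--     entry = skip = error = 0
--     per_day = {}
--     for r in week_rows: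
--         st = r.get("status", "UNKNOWN")
--         entry += st == "ENTRY"
--         skip += st == "SKIP"
--         error += st == "ERROR"
--         dk = r.get("date_jst")
--         e, s = per_day.get(dk, (0, 0))
--         per_day[dk] = (e + (st == "ENTRY"), s + (st == "SKIP"))
--
--     reason_counts = Counter(
--         c.strip()
--         for r in week_rows
--         for c in r.get("reason_code", "").split(";")
--         if c.strip())
--
--     out = [f"FX Weekly Review - {week_start} ~ {week_end} JST",
--            "",
--            "■ Weekly Summary",
--            f"  対象日数: {len(per_day)} 日",
--            f"  ENTRY: {entry} 件",
--            f"  SKIP:  {skip} 件",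
--            f"  ERROR: {error} 件",
--            ""]
--
--     if reason_counts:
--         out.append("■ Reason Code 内訳")
--         for code, count in reason_counts.most_common():
--             out.append(f"  {code} ({REASON_TEXT_MAP.get(code, code)}): {count}")
--         out.append("")
--
--     out.append("■ Daily Breakdown")
--     for d in sorted({r.get("date_jst", "") for r in week_rows}):
--         e, s = per_day.get(d, (0, 0))
--         out.append(f"  {d}: ENTRY={e} SKIP={s}")
--     out.append("")
--
--     return "\n".join(out)
-- ===== Notes on version B (the rewrite author's own statement) =====
-- stated objective: alternative
-- what changed: B makes one fused pass that tallies statuses and groups per-date (entry, skip) pairs in a dict, so the daily breakdown reads the dict instead of re-filtering and re-counting all rows for every date, and the reason counter is built from one flattened generator; it trades A's per-date rescans for per-row dict maintenance.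
import Mathlib
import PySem

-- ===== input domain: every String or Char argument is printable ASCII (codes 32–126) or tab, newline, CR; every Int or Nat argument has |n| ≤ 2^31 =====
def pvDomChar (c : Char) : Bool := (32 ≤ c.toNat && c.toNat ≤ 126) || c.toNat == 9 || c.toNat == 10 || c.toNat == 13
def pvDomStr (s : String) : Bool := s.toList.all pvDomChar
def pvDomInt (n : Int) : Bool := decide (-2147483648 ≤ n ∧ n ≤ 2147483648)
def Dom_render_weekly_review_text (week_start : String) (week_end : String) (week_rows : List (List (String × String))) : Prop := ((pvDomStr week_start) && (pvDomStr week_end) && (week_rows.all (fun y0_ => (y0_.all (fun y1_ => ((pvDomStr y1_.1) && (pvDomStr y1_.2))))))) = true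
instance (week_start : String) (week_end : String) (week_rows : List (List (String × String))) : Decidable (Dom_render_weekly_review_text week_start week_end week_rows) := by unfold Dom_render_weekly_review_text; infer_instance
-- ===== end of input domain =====

-- B replaces A's per-date rescan of all rows (and its Counter-of-statuses passes) by one
-- fused pass that counts statuses and groups (entry, skip) per date in a dict; objective: alternative.

-- shared helpers: a Python row dict r modelled as PySem.Dict built from the association list
def pyRowGet? (r : List (String × String)) (k : String) : Option String :=
  (PySem.Dict.ofList r).get? k

def pyRowGetD (r : List (String × String)) (k : String) (d : String) : String :=
  (PySem.Dict.ofList r).getD k d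

def REASON_TEXT_MAP : PySem.Dict String String := PySem.Dict.ofList
  [("W", "週足環境NG"), ("D", "日足環境NG"), ("A", "週足/日足不整合"), ("P", "パターン不成立"),
   ("R", "RR不足"), ("X", "EMA乖離大"), ("S", "週足抵抗/支持近い"), ("E", "重要イベント"),
   ("O", "既存ポジションあり"), ("C", "総リスク/相関超過")]

-- ===== PORT A =====
-- Counter(r.get("status","UNKNOWN") for r in rows), then the literal result dict
def summarize_signals (rows : List (List (String × String))) : PySem.Dict String Int :=
  let counter := PySem.Dict.counter (rows.map (fun r => pyRowGetD r "status" "UNKNOWN"))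
  ((((PySem.Dict.empty.insert "total" (rows.length : Int)).insert "entry"
      (counter.getD "ENTRY" 0)).insert "skip" (counter.getD "SKIP" 0)).insert "error"
      (counter.getD "ERROR" 0)).insert "no_data" (counter.getD "NO_DATA" 0)

-- row loop; "if not codes: continue"; inner loop over codes.split(";") with strip and skip-empty
def summarize_reason_codes (rows : List (List (String × String))) : PySem.Dict String Int :=
  rows.foldl (fun counter r =>
    let codes := pyRowGetD r "reason_code" ""
    if codes = "" then counter
    else ((PySem.Str.split? codes ";").getD []).foldl (fun counter c =>
      let c := PySem.Str.strip c
      if c ≠ "" then counter.modify c 0 (· + 1) else counter) counter)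
    PySem.Dict.empty

def render_weekly_review_text (week_start : String) (week_end : String) (week_rows : List (List (String × String))) : String :=
  let summary := summarize_signals week_rows
  let lines1 : List String :=
    ["FX Weekly Review - " ++ week_start ++ " ~ " ++ week_end ++ " JST", "",
     "■ Weekly Summary",
     "  対象日数: " ++ PySem.Int.toStr ((PySem.Set.ofList (week_rows.map (fun r => pyRowGet? r "date_jst"))).length : Int) ++ " 日",
     "  ENTRY: " ++ PySem.Int.toStr (summary.getD "entry" 0) ++ " 件",
     "  SKIP:  " ++ PySem.Int.toStr (summary.getD "skip" 0) ++ " 件",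
     "  ERROR: " ++ PySem.Int.toStr (summary.getD "error" 0) ++ " 件",
     ""]
  let reason_counts := summarize_reason_codes week_rows
  -- "if reason_counts:" — a Counter is truthy iff it has entries
  let lines2 : List String :=
    if reason_counts.size ≠ 0 then
      "■ Reason Code 内訳" ::
      (PySem.List.sorted reason_counts.items (fun p => p.2) true).map (fun p =>
        "  " ++ p.1 ++ " (" ++ REASON_TEXT_MAP.getD p.1 p.1 ++ "): " ++ PySem.Int.toStr p.2)
      ++ [""]
    else []
  let dates := PySem.List.sorted (PySem.Set.ofList (week_rows.map (fun r => pyRowGetD r "date_jst" ""))) (fun x => x) false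
  let lines3 : List String :=
    "■ Daily Breakdown" ::
    dates.map (fun d =>
      let day_rows := week_rows.filter (fun r => pyRowGet? r "date_jst" == some d)
      let ds := summarize_signals day_rows
      let statuses := "ENTRY=" ++ PySem.Int.toStr (ds.getD "entry" 0) ++ " SKIP=" ++ PySem.Int.toStr (ds.getD "skip" 0)
      "  " ++ d ++ ": " ++ statuses)
    ++ [""]
  PySem.Str.join "\n" (lines1 ++ lines2 ++ lines3)

-- ===== PORT B =====
-- one fused pass: status tallies plus the per-date (entry, skip) dict (keys are r.get("date_jst"), possibly None)
def bStep (acc : Int × Int × Int × PySem.Dict (Option String) (Int × Int))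
    (r : List (String × String)) : Int × Int × Int × PySem.Dict (Option String) (Int × Int) :=
  let st := pyRowGetD r "status" "UNKNOWN"
  let dk := pyRowGet? r "date_jst"
  let es := acc.2.2.2.getD dk (0, 0)
  (acc.1 + (if st = "ENTRY" then 1 else 0),
   acc.2.1 + (if st = "SKIP" then 1 else 0),
   acc.2.2.1 + (if st = "ERROR" then 1 else 0),
   acc.2.2.2.insert dk (es.1 + (if st = "ENTRY" then 1 else 0), es.2 + (if st = "SKIP" then 1 else 0)))

def render_weekly_review_text_alt (week_start : String) (week_end : String) (week_rows : List (List (String × String))) : String :=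
  let acc := week_rows.foldl bStep (0, 0, 0, PySem.Dict.empty)
  -- Counter(c.strip() for r in rows for c in r.get("reason_code","").split(";") if c.strip())
  let reason_counts := PySem.Dict.counter (week_rows.flatMap (fun r =>
    (((PySem.Str.split? (pyRowGetD r "reason_code" "") ";").getD []).filter
      (fun c => PySem.Str.strip c != "")).map PySem.Str.strip))
  let out1 : List String :=
    ["FX Weekly Review - " ++ week_start ++ " ~ " ++ week_end ++ " JST", "",
     "■ Weekly Summary",
     "  対象日数: " ++ PySem.Int.toStr (acc.2.2.2.size : Int) ++ " 日",
     "  ENTRY: " ++ PySem.Int.toStr acc.1 ++ " 件",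
     "  SKIP:  " ++ PySem.Int.toStr acc.2.1 ++ " 件",
     "  ERROR: " ++ PySem.Int.toStr acc.2.2.1 ++ " 件",
     ""]
  let out2 : List String :=
    if reason_counts.size ≠ 0 then
      "■ Reason Code 内訳" ::
      (PySem.List.sorted reason_counts.items (fun p => p.2) true).map (fun p =>
        "  " ++ p.1 ++ " (" ++ REASON_TEXT_MAP.getD p.1 p.1 ++ "): " ++ PySem.Int.toStr p.2)
      ++ [""]
    else []
  let out3 : List String :=
    "■ Daily Breakdown" ::
    (PySem.List.sorted (PySem.Set.ofList (week_rows.map (fun r => pyRowGetD r "date_jst" ""))) (fun x => x) false).map (fun d =>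
      let es := acc.2.2.2.getD (some d) (0, 0)
      "  " ++ d ++ ": " ++ ("ENTRY=" ++ PySem.Int.toStr es.1 ++ " SKIP=" ++ PySem.Int.toStr es.2))
    ++ [""]
  PySem.Str.join "\n" (out1 ++ out2 ++ out3)

-- ===== PRECONDITION & SPEC =====
def Spec_render_weekly_review_text (week_start : String) (week_end : String) (week_rows : List (List (String × String))) (out : String) : Prop := out = render_weekly_review_text_alt week_start week_end week_rows
instance (week_start : String) (week_end : String) (week_rows : List (List (String × String))) (out : String) : Decidable (Spec_render_weekly_review_text week_start week_end week_rows out) := by unfold Spec_render_weekly_review_text; infer_instance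

-- ===== CLAIM (what is proved, stated in full; the proofs are below) =====
def Claim_equal_render_weekly_review_text : Prop := ∀ (week_start : String) (week_end : String) (week_rows : List (List (String × String))), Dom_render_weekly_review_text week_start week_end week_rows → Spec_render_weekly_review_text week_start week_end week_rows (render_weekly_review_text week_start week_end week_rows)


-- ===== LEMMAS AND PROOFS =====

-- B's fused fold, first three components: running status tallies
theorem bfold_fst (rows : List (List (String × String))) :
    ∀ s, (rows.foldl bStep s).1
      = s.1 + ((rows.countP (fun r => pyRowGetD r "status" "UNKNOWN" == "ENTRY") : Nat) : Int) := by
  induction rows with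
  | nil => intro s; simp
  | cons r rows ih =>
    intro s
    simp only [List.foldl_cons]
    rw [ih]
    by_cases h : pyRowGetD r "status" "UNKNOWN" = "ENTRY" <;>
      simp [bStep, h, List.countP_cons] <;> push_cast <;> ring

theorem bfold_snd (rows : List (List (String × String))) :
    ∀ s, (rows.foldl bStep s).2.1
      = s.2.1 + ((rows.countP (fun r => pyRowGetD r "status" "UNKNOWN" == "SKIP") : Nat) : Int) := by
  induction rows with
  | nil => intro s; simp
  | cons r rows ih =>
    intro s
    simp only [List.foldl_cons]
    rw [ih]
    by_cases h : pyRowGetD r "status" "UNKNOWN" = "SKIP" <;>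
      simp [bStep, h, List.countP_cons] <;> push_cast <;> ring

theorem bfold_thd (rows : List (List (String × String))) :
    ∀ s, (rows.foldl bStep s).2.2.1
      = s.2.2.1 + ((rows.countP (fun r => pyRowGetD r "status" "UNKNOWN" == "ERROR") : Nat) : Int) := by
  induction rows with
  | nil => intro s; simp
  | cons r rows ih =>
    intro s
    simp only [List.foldl_cons]
    rw [ih]
    by_cases h : pyRowGetD r "status" "UNKNOWN" = "ERROR" <;>
      simp [bStep, h, List.countP_cons] <;> push_cast <;> ring

-- B's per-date dict: lookup at any key is the pair of matching ENTRY/SKIP counts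
theorem bfold_getD (rows : List (List (String × String))) :
    ∀ s (k : Option String), (rows.foldl bStep s).2.2.2.getD k (0, 0)
      = ((s.2.2.2.getD k (0, 0)).1 + ((rows.countP (fun r => pyRowGetD r "status" "UNKNOWN" == "ENTRY" && pyRowGet? r "date_jst" == k) : Nat) : Int),
         (s.2.2.2.getD k (0, 0)).2 + ((rows.countP (fun r => pyRowGetD r "status" "UNKNOWN" == "SKIP" && pyRowGet? r "date_jst" == k) : Nat) : Int)) := by
  induction rows with
  | nil => intro s k; simp
  | cons r rows ih =>
    intro s k
    simp only [List.foldl_cons]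
    rw [ih]
    by_cases hk : pyRowGet? r "date_jst" = k
    · by_cases hE : pyRowGetD r "status" "UNKNOWN" = "ENTRY" <;>
        by_cases hS : pyRowGetD r "status" "UNKNOWN" = "SKIP" <;>
        simp [bStep, PySem.Dict.getD_insert, beq_iff_eq, hk, hE, hS, Prod.ext_iff,
          List.countP_cons] <;> omega
    · by_cases hE : pyRowGetD r "status" "UNKNOWN" = "ENTRY" <;>
        by_cases hS : pyRowGetD r "status" "UNKNOWN" = "SKIP" <;>
        simp [bStep, PySem.Dict.getD_insert, beq_iff_eq, Ne.symm hk, hk, hE, hS, Prod.ext_iff,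
          List.countP_cons] <;> omega

-- B's per-date dict as a plain insert-fold (to read off its keys)
theorem bfold_pd (rows : List (List (String × String))) :
    ∀ s, (rows.foldl bStep s).2.2.2
      = rows.foldl (fun pd r => pd.insert (pyRowGet? r "date_jst")
          ((pd.getD (pyRowGet? r "date_jst") (0, 0)).1 + (if pyRowGetD r "status" "UNKNOWN" = "ENTRY" then 1 else 0),
           (pd.getD (pyRowGet? r "date_jst") (0, 0)).2 + (if pyRowGetD r "status" "UNKNOWN" = "SKIP" then 1 else 0))) s.2.2.2 := by
  induction rows with
  | nil => intro s; simp
  | cons r rows ih =>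
    intro s
    simp only [List.foldl_cons]
    rw [ih]
    rfl

theorem dict_size_eq_keys_length {κ ν : Type} (d : PySem.Dict κ ν) : d.size = d.keys.length := by
  simp [PySem.Dict.size, PySem.Dict.keys]

-- len(per_day) = len(set(r.get("date_jst") for r in rows))
theorem bfold_size (rows : List (List (String × String))) :
    (rows.foldl bStep (0, 0, 0, PySem.Dict.empty)).2.2.2.size
      = (PySem.Set.ofList (rows.map (fun r => pyRowGet? r "date_jst"))).length := by
  rw [dict_size_eq_keys_length, bfold_pd]
  rw [PySem.Dict.keys_foldl_insert_key rows (fun r => pyRowGet? r "date_jst") _ PySem.Dict.empty]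
  rw [PySem.Dict.keys_empty]
  rfl

-- A's summary dict, looked up at its three used keys
theorem ss_getD_entry (rows : List (List (String × String))) :
    (summarize_signals rows).getD "entry" 0
      = ((rows.countP (fun r => pyRowGetD r "status" "UNKNOWN" == "ENTRY") : Nat) : Int) := by
  simp [summarize_signals, PySem.Dict.getD_insert, PySem.Dict.getD_counter,
    List.count_eq_countP, List.countP_map]
  rfl

theorem ss_getD_skip (rows : List (List (String × String))) :
    (summarize_signals rows).getD "skip" 0
      = ((rows.countP (fun r => pyRowGetD r "status" "UNKNOWN" == "SKIP") : Nat) : Int) := by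
  simp [summarize_signals, PySem.Dict.getD_insert, PySem.Dict.getD_counter,
    List.count_eq_countP, List.countP_map]
  rfl

theorem ss_getD_error (rows : List (List (String × String))) :
    (summarize_signals rows).getD "error" 0
      = ((rows.countP (fun r => pyRowGetD r "status" "UNKNOWN" == "ERROR") : Nat) : Int) := by
  simp [summarize_signals, PySem.Dict.getD_insert, PySem.Dict.getD_counter,
    List.count_eq_countP, List.countP_map]
  rfl

-- A's row-by-row reason counter is the Counter of B's flattened stripped-code list
theorem reasons_eq (rows : List (List (String × String))) :
    summarize_reason_codes rows
      = PySem.Dict.counter (rows.flatMap (fun r =>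
          (((PySem.Str.split? (pyRowGetD r "reason_code" "") ";").getD []).filter
            (fun c => PySem.Str.strip c != "")).map PySem.Str.strip)) := by
  rw [PySem.Dict.counter_eq_foldl, summarize_reason_codes]
  suffices h : ∀ (d : PySem.Dict String Int),
      rows.foldl (fun counter r =>
        let codes := pyRowGetD r "reason_code" ""
        if codes = "" then counter
        else ((PySem.Str.split? codes ";").getD []).foldl (fun counter c =>
          let c := PySem.Str.strip c
          if c ≠ "" then counter.modify c 0 (· + 1) else counter) counter) d
      = (rows.flatMap (fun r =>
          (((PySem.Str.split? (pyRowGetD r "reason_code" "") ";").getD []).filter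
            (fun c => PySem.Str.strip c != "")).map PySem.Str.strip)).foldl
          (fun d x => d.modify x 0 (· + 1)) d by
    exact h _
  induction rows with
  | nil => intro d; simp
  | cons r rows ih =>
    intro d
    simp only [List.foldl_cons, List.flatMap_cons, List.foldl_append]
    rw [ih]
    congr 1
    rw [List.foldl_map, List.foldl_filter]
    by_cases hc : pyRowGetD r "reason_code" "" = ""
    · rw [hc]
      rfl
    · simp only [hc, if_false]
      congr 1
      funext x y
      by_cases h : PySem.Str.strip y = "" <;> simp [h]

-- ===== VERDICT (by name: the statement is the Claim_ definition above) =====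
theorem render_weekly_review_text_spec : Claim_equal_render_weekly_review_text := by
  intro week_start week_end week_rows _
  unfold Spec_render_weekly_review_text
  simp only [render_weekly_review_text, render_weekly_review_text_alt]
  rw [reasons_eq]
  simp only [ss_getD_entry, ss_getD_skip, ss_getD_error, bfold_fst, bfold_snd, bfold_thd,
    bfold_getD, bfold_size, List.countP_filter, PySem.Dict.getD_empty, zero_add]
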